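-- pv_equiv track=rewrite | github.com/thegeek-sys/uni | FP/LAB/LAB.04/sorting.py | remove_avg
-- ===== SOURCE A (Python) =====
-- def remove_avg(a: list) -> list:
--     b = []
--     def media(lista):
--         y = 0
--         for x in lista:
--             y += x
--         return y//len(lista)
--
--     for i in range(len(a)):
--         if i != 0:
--             if a[i] > 2*media(a[0:i]):
--                 b.append(a[i])
--     return b
-- ===== SOURCE B (Python) =====
-- def remove_avg(a):
--     b = []
--     s = 0
--     for i, x in enumerate(a):
--         if i > 0 and x > 2 * (s // i):
--             b.append(x)
--         s += x
--     return b
-- ===== Notes on version B (the rewrite author's own statement) =====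
-- stated objective: faster
-- what changed: B keeps a running prefix sum in one pass instead of re-summing the prefix slice for every index, removing the inner loop.
import Mathlib
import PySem

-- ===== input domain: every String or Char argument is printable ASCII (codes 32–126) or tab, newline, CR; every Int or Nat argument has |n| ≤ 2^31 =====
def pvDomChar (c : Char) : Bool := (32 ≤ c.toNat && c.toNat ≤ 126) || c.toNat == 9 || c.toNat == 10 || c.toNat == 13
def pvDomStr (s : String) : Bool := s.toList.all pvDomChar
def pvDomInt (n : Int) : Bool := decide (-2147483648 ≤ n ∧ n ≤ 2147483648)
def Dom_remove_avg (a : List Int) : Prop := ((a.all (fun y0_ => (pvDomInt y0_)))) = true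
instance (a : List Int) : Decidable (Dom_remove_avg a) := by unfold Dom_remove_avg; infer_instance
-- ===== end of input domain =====

-- B replaces A's per-index re-summation of the prefix slice by a single pass with a running
-- prefix sum (objective: faster, O(n) instead of O(n^2)).

-- ===== PORT A =====
-- inner helper 'media': sum by a loop, then floor division by the length
def pvMedia (lista : List Int) : Int :=
  PySem.Int.floordiv (lista.foldl (· + ·) 0) lista.length

-- one iteration of A's 'for i in range(len(a))' loop body (indices are always in range, so pyGetD is exact)
def pvStepA (a : List Int) (b : List Int) (i : Int) : List Int :=
  if i ≠ 0 then
    if PySem.List.pyGetD a i 0 > 2 * pvMedia (PySem.List.slice a (some 0) (some i)) then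
      b ++ [PySem.List.pyGetD a i 0]
    else b
  else b

def remove_avg (a : List Int) : List Int :=
  (PySem.List.pyRange 0 (a.length : Int) 1).foldl (pvStepA a) []

-- ===== PORT B =====
-- Source B's loop: enumerate with a running sum s; i and s are carried through the recursion
def pvGoB (xs : List Int) (i s : Int) (b : List Int) : List Int :=
  match xs with
  | [] => b
  | x :: rest =>
      pvGoB rest (i + 1) (s + x)
        (if i > 0 ∧ x > 2 * PySem.Int.floordiv s i then b ++ [x] else b)

def remove_avg_alt (a : List Int) : List Int :=
  pvGoB a 0 0 []

-- ===== PRECONDITION & SPEC =====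
def Spec_remove_avg (a : List Int) (out : List Int) : Prop := out = remove_avg_alt a
instance (a : List Int) (out : List Int) : Decidable (Spec_remove_avg a out) := by unfold Spec_remove_avg; infer_instance

-- ===== CLAIM (what is proved, stated in full; the proofs are below) =====
def Claim_equal_remove_avg : Prop := ∀ (a : List Int), Dom_remove_avg a → Spec_remove_avg a (remove_avg a)

-- ===== LEMMAS AND PROOFS =====

lemma pvKey (rest : List Int) : ∀ (pre b : List Int),
    (PySem.List.pyRange (pre.length : Int) ((pre.length : Int) + rest.length) 1).foldl
      (pvStepA (pre ++ rest)) b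
    = pvGoB rest (pre.length : Int) (pre.foldl (· + ·) 0) b := by
  induction rest with
  | nil =>
      intro pre b
      simp [PySem.List.pyRange_one_eq_nil, pvGoB]
  | cons x xs ih =>
      intro pre b
      have hlt : (pre.length : Int) < (pre.length : Int) + ((x :: xs).length : Int) := by
        simp only [List.length_cons]; push_cast; omega
      rw [PySem.List.pyRange_one_cons hlt]
      simp only [List.foldl_cons]
      have hget : PySem.List.pyGetD (pre ++ x :: xs) (pre.length : Int) 0 = x := by
        simp [PySem.List.pyGetD_natCast, List.getD]
      have hslice : PySem.List.slice (pre ++ x :: xs) (some 0) (some (pre.length : Int)) = pre := by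
        rw [PySem.List.slice_zero_start, PySem.List.slice_to_natCast, List.take_left]
      have hstep : pvStepA (pre ++ x :: xs) b (pre.length : Int)
          = (if (pre.length : Int) > 0 ∧
               x > 2 * PySem.Int.floordiv (pre.foldl (· + ·) 0) (pre.length : Int) then
               b ++ [x] else b) := by
        by_cases hp : pre = []
        · subst hp; simp [pvStepA]
        · have hpos : 0 < pre.length := List.length_pos_iff.mpr hp
          simp [pvStepA, hget, hslice, pvMedia, hp, hpos]
      have := ih (pre ++ [x])
        ((if (pre.length : Int) > 0 ∧
            x > 2 * PySem.Int.floordiv (pre.foldl (· + ·) 0) (pre.length : Int) then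
            b ++ [x] else b))
      simp only [List.length_append, List.length_singleton, List.foldl_append,
        List.foldl_cons, List.foldl_nil, List.append_assoc, List.singleton_append] at this
      have harg : ((pre.length : Int) + ((x :: xs).length : Int))
          = ((pre.length : Int) + 1) + (xs.length : Int) := by
        simp only [List.length_cons]; push_cast; ring
      rw [hstep, harg, pvGoB]
      push_cast at this ⊢
      exact this

-- ===== VERDICT (by name: the statement is the Claim_ definition above) =====
theorem remove_avg_spec : Claim_equal_remove_avg := by
  intro a _
  unfold Spec_remove_avg remove_avg remove_avg_alt
  have := pvKey a [] []
  simpa using this
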